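-- pv_equiv track=rewrite | github.com/Arteeck/Randomness-tests | randomness_tests.py | calculate_gaps_length
-- ===== SOURCE A (Python) =====
-- from collections import Counter, defaultdict
--
-- def calculate_gaps_length(random_list):
--     current_gaps = defaultdict(int)
--     result_gaps = list()
--     for number in random_list:
--         for i in current_gaps.keys():
--             if i != number:
--                 current_gaps[i] += 1
--         if current_gaps[number] != 0:
--             result_gaps.append(current_gaps[number])
--         current_gaps[number] = 0
--     return Counter(result_gaps)
-- ===== SOURCE B (Python) =====
-- from collections import Counter
--
-- def calculate_gaps_length(random_list):
--     last_index = {}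
--     gaps = []
--     for i, number in enumerate(random_list):
--         if number in last_index:
--             gap = i - last_index[number] - 1
--             if gap != 0:
--                 gaps.append(gap)
--         last_index[number] = i
--     return Counter(gaps)
-- ===== Notes on version B (the rewrite author's own statement) =====
-- stated objective: faster
-- what changed: Replaces the per-element sweep that increments a running counter for every previously seen value with a single enumerate pass that remembers each value's last index and computes each gap by subtraction.
import Mathlib
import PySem

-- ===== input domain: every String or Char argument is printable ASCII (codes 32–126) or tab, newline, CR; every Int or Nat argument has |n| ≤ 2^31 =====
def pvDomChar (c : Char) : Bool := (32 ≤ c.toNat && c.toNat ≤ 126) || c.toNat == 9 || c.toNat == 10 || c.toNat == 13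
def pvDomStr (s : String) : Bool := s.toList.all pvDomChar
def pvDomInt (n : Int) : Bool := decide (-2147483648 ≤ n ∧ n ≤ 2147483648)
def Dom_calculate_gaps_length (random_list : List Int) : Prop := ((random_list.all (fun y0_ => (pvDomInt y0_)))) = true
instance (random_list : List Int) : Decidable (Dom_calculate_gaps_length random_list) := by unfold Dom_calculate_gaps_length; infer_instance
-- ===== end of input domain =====

-- B replaces A's per-element sweep over all previously seen values (a running counter per value)
-- with a single enumerate pass that remembers each value's last index and computes gaps by subtraction (faster).

-- ===== PORT A =====
-- one iteration of A's outer loop: sweep all keys, read the running counter for `number`, reset it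
def pvStepA (st : PySem.Dict Int Int × List Int) (number : Int) : PySem.Dict Int Int × List Int :=
  let d := st.1.keys.foldl (fun d' i => if i ≠ number then d'.modify i 0 (· + 1) else d') st.1
  let g := d.getD number 0            -- defaultdict read: current_gaps[number]
  let res := if g ≠ 0 then st.2 ++ [g] else st.2
  (d.insert number 0, res)            -- current_gaps[number] = 0

def calculate_gaps_length (random_list : List Int) : List (Int × Int) :=
  (PySem.Dict.counter (random_list.foldl pvStepA (PySem.Dict.empty, [])).2).items

-- ===== PORT B =====
-- one iteration of B's loop over enumerate(random_list): gap by index subtraction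
def pvStepB (st : PySem.Dict Int Int × List Int) (p : Int × Int) : PySem.Dict Int Int × List Int :=
  let res := match st.1.get? p.2 with
    | some j => let gap := p.1 - j - 1
                if gap ≠ 0 then st.2 ++ [gap] else st.2
    | none => st.2
  (st.1.insert p.2 p.1, res)

def calculate_gaps_length_alt (random_list : List Int) : List (Int × Int) :=
  (PySem.Dict.counter ((PySem.List.enumerate random_list).foldl pvStepB (PySem.Dict.empty, [])).2).items

-- ===== PRECONDITION & SPEC =====
def Spec_calculate_gaps_length (random_list : List Int) (out : List (Int × Int)) : Prop := out = calculate_gaps_length_alt random_list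
instance (random_list : List Int) (out : List (Int × Int)) : Decidable (Spec_calculate_gaps_length random_list out) := by unfold Spec_calculate_gaps_length; infer_instance

-- ===== CLAIM (what is proved, stated in full; the proofs are below) =====
def Claim_equal_calculate_gaps_length : Prop := ∀ (random_list : List Int), Dom_calculate_gaps_length random_list → Spec_calculate_gaps_length random_list (calculate_gaps_length random_list)

-- ===== LEMMAS AND PROOFS =====

-- A's inner sweep over a list of existing keys leaves the key set unchanged
theorem pv_inner_keys (number : Int) (l : List Int) (d : PySem.Dict Int Int)
    (hsub : ∀ k ∈ l, k ∈ d.keys) :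
    (l.foldl (fun d' i => if i ≠ number then d'.modify i 0 (· + 1) else d') d).keys = d.keys := by
  induction l generalizing d with
  | nil => rfl
  | cons k l ih =>
    simp only [List.foldl_cons]
    by_cases hk : k ≠ number
    · rw [if_pos hk]
      have hkeys : (d.modify k 0 (· + 1)).keys = d.keys := by
        rw [PySem.Dict.keys_modify]
        have : d.contains k = true := by
          rw [PySem.Dict.contains_iff_mem_keys]; exact hsub k (by simp)
        exact PySem.Dict.keys_insert_of_contains d _ this
      rw [ih _ (fun x hx => by rw [hkeys]; exact hsub x (by simp [hx])), hkeys]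
    · rw [if_neg hk]
      exact ih _ (fun x hx => hsub x (by simp [hx]))

-- value of A's inner sweep: each existing key ≠ number is incremented once
theorem pv_inner_getD (number : Int) (l : List Int) (d : PySem.Dict Int Int) (v : Int)
    (hnd : l.Nodup) (hsub : ∀ k ∈ l, k ∈ d.keys) :
    (l.foldl (fun d' i => if i ≠ number then d'.modify i 0 (· + 1) else d') d).getD v 0 =
      if v ∈ l ∧ v ≠ number then d.getD v 0 + 1 else d.getD v 0 := by
  induction l generalizing d with
  | nil => simp
  | cons k l ih =>
    simp only [List.foldl_cons]
    have hnd' : l.Nodup := (List.nodup_cons.mp hnd).2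
    have hknl : k ∉ l := (List.nodup_cons.mp hnd).1
    by_cases hk : k ≠ number
    · rw [if_pos hk]
      have hcont : d.contains k = true := by
        rw [PySem.Dict.contains_iff_mem_keys]; exact hsub k (by simp)
      have hkeys : (d.modify k 0 (· + 1)).keys = d.keys := by
        rw [PySem.Dict.keys_modify]; exact PySem.Dict.keys_insert_of_contains d _ hcont
      rw [ih _ hnd' (fun x hx => by rw [hkeys]; exact hsub x (by simp [hx]))]
      simp only [PySem.Dict.getD_modify]
      by_cases hv : v = k
      · subst hv; simp [hknl, hk]
      · simp [hv, List.mem_cons]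
    · rw [if_neg hk]
      rw [ih _ hnd' (fun x hx => hsub x (by simp [hx]))]
      push Not at hk
      subst hk
      by_cases hv : v = k
      · subst hv; simp [hknl]
      · simp [hv, List.mem_cons]

-- main invariant: A's running counter for v equals (current index) - (B's last index of v) - 1
theorem pv_main (l : List Int) (i : Int) (dA dB : PySem.Dict Int Int) (res : List Int)
    (hnd : dA.keys.Nodup)
    (hkeys : dA.keys = dB.keys)
    (hval : ∀ v j, dB.get? v = some j → dA.getD v 0 = i - j - 1) :
    (l.foldl pvStepA (dA, res)).2 = ((PySem.List.enumerate l i).foldl pvStepB (dB, res)).2 := by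
  induction l generalizing i dA dB res with
  | nil => simp [PySem.List.enumerate_nil]
  | cons x l ih =>
    rw [PySem.List.enumerate_cons]
    simp only [List.foldl_cons]
    set d' := dA.keys.foldl (fun d'' k => if k ≠ x then d''.modify k 0 (· + 1) else d'') dA with hd'
    have hk' : d'.keys = dA.keys := pv_inner_keys x dA.keys dA (fun k hk => hk)
    have hgetD : ∀ v, d'.getD v 0 =
        if v ∈ dA.keys ∧ v ≠ x then dA.getD v 0 + 1 else dA.getD v 0 :=
      fun v => pv_inner_getD x dA.keys dA v hnd (fun k hk => hk)
    -- the appended gap agrees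
    have hsame : (pvStepA (dA, res) x).2 = (pvStepB (dB, res) (i, x)).2 := by
      show (if d'.getD x 0 ≠ 0 then res ++ [d'.getD x 0] else res) = _
      have hx0 : d'.getD x 0 = dA.getD x 0 := by rw [hgetD x]; simp
      cases hB : dB.get? x with
      | some j =>
        have := hval x j hB
        show _ = (pvStepB (dB, res) (i, x)).2
        simp only [pvStepB, hB, hx0, this]
      | none =>
        have hxk : x ∉ dA.keys := by
          rw [hkeys]; rw [← PySem.Dict.get?_eq_none_iff_not_mem_keys] at *; exact hB
        have : dA.getD x 0 = 0 := by
          apply PySem.Dict.getD_of_not_contains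
          rw [← Bool.not_eq_true, PySem.Dict.contains_iff_mem_keys]; exact hxk
        simp only [pvStepB, hB, hx0, this]
        simp
    -- step the invariant
    have h1 : (pvStepA (dA, res) x).1 = d'.insert x 0 := rfl
    have h2 : (pvStepB (dB, res) (i, x)).1 = dB.insert x i := rfl
    have hndA' : (d'.insert x 0).keys.Nodup := PySem.Dict.nodup_keys_insert _ _ _ (hk' ▸ hnd)
    have hkeys' : (d'.insert x 0).keys = (dB.insert x i).keys := by
      by_cases hc : x ∈ dA.keys
      · rw [PySem.Dict.keys_insert_of_contains, PySem.Dict.keys_insert_of_contains, hk', hkeys]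
        · rw [PySem.Dict.contains_iff_mem_keys, ← hkeys]; exact hc
        · rw [PySem.Dict.contains_iff_mem_keys, hk']; exact hc
      · rw [PySem.Dict.keys_insert_of_not_contains, PySem.Dict.keys_insert_of_not_contains, hk', hkeys]
        · rw [← Bool.not_eq_true, PySem.Dict.contains_iff_mem_keys, ← hkeys]; exact hc
        · rw [← Bool.not_eq_true, PySem.Dict.contains_iff_mem_keys, hk']; exact hc
    have hval' : ∀ v j, (dB.insert x i).get? v = some j →
        (d'.insert x 0).getD v 0 = (i + 1) - j - 1 := by
      intro v j hv
      by_cases hvx : v = x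
      · subst hvx
        rw [PySem.Dict.get?_insert_self] at hv
        have hij : i = j := by injection hv
        rw [PySem.Dict.getD_insert_self]
        omega
      · rw [PySem.Dict.get?_insert_of_ne _ _ hvx] at hv
        rw [PySem.Dict.getD_insert_of_ne _ _ _ hvx, hgetD v]
        have hvmem : v ∈ dA.keys := by
          rw [hkeys, ← PySem.Dict.contains_iff_mem_keys, PySem.Dict.contains_eq_isSome_get?, hv]
          rfl
        have hvv := hval v j hv
        rw [if_pos ⟨hvmem, hvx⟩, hvv]
        ring
    rw [show pvStepA (dA, res) x = (d'.insert x 0, (pvStepB (dB, res) (i, x)).2) by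
          rw [← hsame, ← h1],
        show pvStepB (dB, res) (i, x) = (dB.insert x i, (pvStepB (dB, res) (i, x)).2) by
          rw [← h2]]
    exact ih (i + 1) (d'.insert x 0) (dB.insert x i) _ hndA' hkeys' hval' 

-- ===== VERDICT (by name: the statement is the Claim_ definition above) =====
theorem calculate_gaps_length_spec : Claim_equal_calculate_gaps_length := by
  intro l _
  unfold Spec_calculate_gaps_length calculate_gaps_length calculate_gaps_length_alt
  rw [pv_main l 0 PySem.Dict.empty PySem.Dict.empty []
    (by simp [PySem.Dict.keys_empty]) rfl
    (by intro v j h; rw [PySem.Dict.get?_empty] at h; cases h)]
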